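-- pv_equiv track=rewrite | github.com/TobyLobster/ImportLDraw | loadldraw/loadldraw.py | __getNextParameter
-- ===== SOURCE A (Python) =====
-- def __getNextParameter(line):
--     line = line.strip()         # skip spaces
--     if not line:
--         return (None, None)
--
--     result = ""
--     inQuotedString = False
--     first = True
--     while line:
--         if line[0:1] == r'\\"' or line[0:1] == r'\\\\':
--             # Backslash signifies a literal character next
--             # Skip the backslash and add the next character
--             line = line[1:]
--         elif line[0] == r'"':
--             # Handle initial and final quote
--             if first:
--                 # found start of a quoted string
--                 inQuotedString = True
--                 line = line[1:]
--                 first = False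
--                 continue
--             elif inQuotedString:
--                 # found end of a quoted string
--                 line = line[1:]
--                 break
--         elif line[0] == ' ':
--             if not inQuotedString:
--                 break
--
--         if line:
--             # Add current character to result
--             result += line[0]
--             line = line[1:]
--         first = False
--
--     return (line, result)
-- ===== SOURCE B (Python) =====
-- def __getNextParameter(line):
--     line = line.strip()
--     if not line:
--         return (None, None)
--     if line[0] == '"':
--         body, sep, rest = line[1:].partition('"')
--         return (rest, body)
--     token, sep, rest = line.partition(' ')
--     return (sep + rest, token)
-- ===== Notes on version B (the rewrite author's own statement) =====
-- stated objective: simpler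
-- what changed: Replaces A's character-by-character accumulate loop with quote/first/space state flags (including a dead backslash branch) by a single branch on the first character plus str.partition at the delimiter.
import Mathlib
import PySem

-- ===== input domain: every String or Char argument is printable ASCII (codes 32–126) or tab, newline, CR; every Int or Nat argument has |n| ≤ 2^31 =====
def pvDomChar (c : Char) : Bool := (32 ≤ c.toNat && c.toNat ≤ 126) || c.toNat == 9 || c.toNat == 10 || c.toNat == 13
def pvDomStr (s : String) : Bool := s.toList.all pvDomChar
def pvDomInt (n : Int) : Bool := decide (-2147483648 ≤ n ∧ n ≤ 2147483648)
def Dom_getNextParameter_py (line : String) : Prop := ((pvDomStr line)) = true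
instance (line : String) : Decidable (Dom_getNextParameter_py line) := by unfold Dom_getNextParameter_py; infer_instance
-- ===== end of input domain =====

-- B replaces A's character-by-character accumulate loop (with its dead backslash branch)
-- by a single find-the-delimiter partition and two slices: simpler, same values.

-- ===== PORT A =====
-- literal port of A's while loop; state = (line, result, inQuotedString, first)
def pvLoopA : List Char → List Char → Bool → Bool → List Char × List Char
  | [], result, _, _ => ([], result)
  | c :: rest, result, inQ, first =>
    -- line[0:1] == r'\\"' or line[0:1] == r'\\\\'  (a 1-char slice compared to 3-/4-char literals)
    if List.take 1 (c :: rest) = ['\\', '\\', '"'] ∨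
       List.take 1 (c :: rest) = ['\\', '\\', '\\', '\\'] then
      -- line = line[1:]; then the trailing "if line: result += line[0]; line = line[1:]" step
      match rest with
      | [] => ([], result)
      | d :: ds => pvLoopA ds (result ++ [d]) inQ false
    else if c = '"' then
      if first then pvLoopA rest result true false          -- start of quoted string, continue
      else if inQ then (rest, result)                       -- end of quoted string, break
      else pvLoopA rest (result ++ [c]) inQ false           -- fall through to the add step
    else if c = ' ' then
      if !inQ then (c :: rest, result)                      -- break
      else pvLoopA rest (result ++ [c]) inQ false           -- fall through to the add step
    else pvLoopA rest (result ++ [c]) inQ false             -- add current character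

def getNextParameter_py (line : String) : Option String × Option String :=
  let l := PySem.Chars.strip line.toList          -- line = line.strip()
  if l = [] then (none, none)
  else
    let p := pvLoopA l [] false true
    (some (String.ofList p.1), some (String.ofList p.2))

-- ===== PORT B =====
-- hand port of Python str.partition(sep) for a 1-char sep (PySem has no partition):
-- returns (before, sep-or-empty, after)
def pvPartition (sep : Char) : List Char → List Char × List Char × List Char
  | [] => ([], [], [])
  | d :: ds =>
    if d = sep then ([], [sep], ds)
    else
      let p := pvPartition sep ds
      (d :: p.1, p.2.1, p.2.2)

def getNextParameter_py_alt (line : String) : Option String × Option String :=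
  let l := PySem.Chars.strip line.toList          -- line = line.strip()
  match l with
  | [] => (none, none)
  | c :: cs =>
    if c = '"' then
      let p := pvPartition '"' cs                 -- body, sep, rest = line[1:].partition('"')
      (some (String.ofList p.2.2), some (String.ofList p.1))
    else
      let p := pvPartition ' ' (c :: cs)          -- token, sep, rest = line.partition(' ')
      (some (String.ofList (p.2.1 ++ p.2.2)), some (String.ofList p.1))

-- ===== PRECONDITION & SPEC =====
def Spec_getNextParameter_py (line : String) (out : Option String × Option String) : Prop := out = getNextParameter_py_alt line
instance (line : String) (out : Option String × Option String) : Decidable (Spec_getNextParameter_py line out) := by unfold Spec_getNextParameter_py; infer_instance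

-- ===== CLAIM (what is proved, stated in full; the proofs are below) =====
def Claim_equal_getNextParameter_py : Prop := ∀ (line : String), Dom_getNextParameter_py line → Spec_getNextParameter_py line (getNextParameter_py line)

-- ===== LEMMAS AND PROOFS =====

-- the backslash branch of A is dead: a one-character slice never equals a 3- or 4-char literal
theorem pvTake1_ne (c : Char) (rest : List Char) :
    ¬ (List.take 1 (c :: rest) = ['\\', '\\', '"'] ∨
       List.take 1 (c :: rest) = ['\\', '\\', '\\', '\\']) := by
  simp

-- outside a quoted string (and past the first character) A's loop is exactly "partition at the first space,
-- the remainder keeps the space"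
theorem pvLoopA_space (l res : List Char) :
    pvLoopA l res false false =
      ((pvPartition ' ' l).2.1 ++ (pvPartition ' ' l).2.2, res ++ (pvPartition ' ' l).1) := by
  induction l generalizing res with
  | nil => simp [pvLoopA, pvPartition]
  | cons d ds ih =>
    rw [pvLoopA.eq_def]
    simp only [pvTake1_ne d ds, if_neg, if_false]
    by_cases hq : d = '"'
    · subst hq
      simp only [if_pos rfl, Bool.false_eq_true, if_false, ih, pvPartition]
      simp
    · by_cases hs : d = ' '
      · subst hs
        simp [pvPartition]
      · simp only [if_neg hq, if_neg hs, ih, pvPartition]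
        simp [hq, hs]

-- inside a quoted string A's loop is exactly "partition at the closing quote, drop the quote"
theorem pvLoopA_quote (l res : List Char) :
    pvLoopA l res true false =
      ((pvPartition '"' l).2.2, res ++ (pvPartition '"' l).1) := by
  induction l generalizing res with
  | nil => simp [pvLoopA, pvPartition]
  | cons d ds ih =>
    rw [pvLoopA.eq_def]
    simp only [pvTake1_ne d ds, if_neg, if_false]
    by_cases hq : d = '"'
    · subst hq
      simp [pvPartition]
    · by_cases hs : d = ' '
      · subst hs
        simp only [if_neg hq, if_pos rfl, Bool.not_true, Bool.false_eq_true, if_false, ih, pvPartition]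
        simp [hq]
      · simp only [if_neg hq, if_neg hs, ih, pvPartition]
        simp [hq]

-- ===== VERDICT (by name: the statement is the Claim_ definition above) =====
theorem getNextParameter_py_spec : Claim_equal_getNextParameter_py := by
  intro line _
  unfold Spec_getNextParameter_py getNextParameter_py getNextParameter_py_alt
  cases h : PySem.Chars.strip line.toList with
  | nil => simp
  | cons c cs =>
    simp only [reduceCtorEq, if_false]
    by_cases hq : c = '"'
    · subst hq
      rw [pvLoopA.eq_def]
      simp only [pvTake1_ne, if_neg, if_false, if_pos rfl, pvLoopA_quote]
      simp
    · by_cases hs : c = ' '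
      · subst hs
        rw [pvLoopA.eq_def]
        simp only [pvTake1_ne, if_neg, if_false]
        simp [pvPartition]
      · rw [pvLoopA.eq_def]
        simp only [pvTake1_ne, if_neg, if_false, if_neg hq, if_neg hs]
        rw [pvLoopA_space]
        simp [pvPartition, hq, hs]
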